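-- pv_equiv track=rewrite | github.com/TheJim123/Projekt-Tomo-vaje | resitve/zanke.py | prvi_samoglasnik
-- ===== SOURCE A (Python) =====
-- def prvi_samoglasnik(niz):
--     samoglasniki = "aeiouAEIOU"
--     k = 0
--     for znak in niz:
--         if znak in samoglasniki:
--             return k
--         k += 1
--     return -1
-- ===== SOURCE B (Python) =====
-- def prvi_samoglasnik(niz):
--     cands = [i for i in (niz.find(v) for v in "aeiouAEIOU") if i >= 0]
--     return min(cands, default=-1)
-- ===== Notes on version B (the rewrite author's own statement) =====
-- stated objective: alternative
-- what changed: Replaces A's single short-circuiting indexed scan with ten independent str.find passes (one per vowel), keeping the non-negative hits and returning their minimum with default -1.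
import Mathlib
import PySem

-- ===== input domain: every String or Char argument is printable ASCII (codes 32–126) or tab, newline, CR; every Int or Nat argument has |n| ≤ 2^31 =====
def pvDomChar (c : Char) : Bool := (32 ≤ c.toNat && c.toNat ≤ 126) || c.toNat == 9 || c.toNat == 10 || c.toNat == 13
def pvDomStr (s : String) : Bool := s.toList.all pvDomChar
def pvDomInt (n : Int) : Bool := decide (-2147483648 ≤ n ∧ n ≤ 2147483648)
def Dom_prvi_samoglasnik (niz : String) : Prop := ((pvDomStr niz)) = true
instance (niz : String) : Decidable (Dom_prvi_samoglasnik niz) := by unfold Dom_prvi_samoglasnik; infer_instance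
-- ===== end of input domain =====

-- B replaces A's single counting scan by ten independent per-vowel find passes whose
-- non-negative results are aggregated by a minimum (default -1); same O(n) cost.

-- ===== PORT A =====
-- the for-loop with counter k, returning k at the first vowel
def pvLoopA : List Char → Int → Int
  | [], _ => -1
  | znak :: rest, k =>
    if PySem.Chars.isIn [znak] "aeiouAEIOU".toList then k else pvLoopA rest (k + 1)

def prvi_samoglasnik (niz : String) : Int := pvLoopA niz.toList 0

-- ===== PORT B =====
def prvi_samoglasnik_alt (niz : String) : Int :=
  let cands := ("aeiouAEIOU".toList.map (fun v => PySem.Str.find niz (String.mk [v]))).filter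
      (fun i => decide (0 ≤ i))
  match cands with
  | [] => -1
  | x :: xs => xs.foldl min x

-- ===== PRECONDITION & SPEC =====
def Spec_prvi_samoglasnik (niz : String) (out : Int) : Prop := out = prvi_samoglasnik_alt niz
instance (niz : String) (out : Int) : Decidable (Spec_prvi_samoglasnik niz out) := by unfold Spec_prvi_samoglasnik; infer_instance

-- ===== CLAIM (what is proved, stated in full; the proofs are below) =====
def Claim_equal_prvi_samoglasnik : Prop := ∀ (niz : String), Dom_prvi_samoglasnik niz → Spec_prvi_samoglasnik niz (prvi_samoglasnik niz)

-- ===== LEMMAS AND PROOFS =====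

-- common characterisation: first index of a vowel, -1 if none
def pvF : List Char → Int
  | [] => -1
  | c :: cs => if c ∈ "aeiouAEIOU".toList then 0 else (if pvF cs = -1 then -1 else 1 + pvF cs)

theorem pvF_ge : ∀ cs, -1 ≤ pvF cs := by
  intro cs; induction cs with
  | nil => simp [pvF]
  | cons c cs ih => simp only [pvF]; split_ifs <;> omega

theorem singleton_prefix_iff (v : Char) (l : List Char) : [v] <+: l ↔ l.head? = some v := by
  cases l with
  | nil => simp
  | cons a t =>
    constructor
    · rintro ⟨s, hs⟩; simp at hs; simp [hs.1]
    · intro h; simp at h; exact ⟨t, by simp [h]⟩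

theorem singleton_infix_iff (v : Char) (l : List Char) : [v] <:+: l ↔ v ∈ l := by
  constructor
  · rintro ⟨s, t, h⟩; subst h; simp
  · intro h
    obtain ⟨a, b, hab⟩ := List.append_of_mem h
    exact ⟨a, b, by simp [hab]⟩

theorem idxOf_le_of_getElem?' (l : List Char) (a : Char) (n : Nat)
    (h : l[n]? = some a) : l.idxOf a ≤ n := by
  induction l generalizing n with
  | nil => simp at h
  | cons b t ih =>
    by_cases hb : b = a
    · simp [hb, List.idxOf_cons_self]
    · cases n with
      | zero => simp [hb] at h
      | succ m =>
        simp only [List.getElem?_cons_succ] at h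
        have := ih m h
        simp [List.idxOf_cons_ne _ hb]
        omega

theorem find_single (cs : List Char) (v : Char) :
    PySem.Chars.find cs [v] = if v ∈ cs then (cs.idxOf v : Int) else -1 := by
  by_cases hv : v ∈ cs
  · have hinf : [v] <:+: cs := (singleton_infix_iff v cs).mpr hv
    have hnn : 0 ≤ PySem.Chars.find cs [v] := (PySem.Chars.find_nonneg_iff cs [v]).mpr hinf
    obtain ⟨hpre, hmin⟩ := PySem.Chars.find_spec hnn
    have hhead : cs[(PySem.Chars.find cs [v]).toNat]? = some v := by
      have := (singleton_prefix_iff v _).mp hpre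
      rwa [List.head?_drop] at this
    have hidx : cs.idxOf v = (PySem.Chars.find cs [v]).toNat := by
      have hle1 : cs.idxOf v ≤ (PySem.Chars.find cs [v]).toNat :=
        idxOf_le_of_getElem?' cs v _ hhead
      have hle2 : (PySem.Chars.find cs [v]).toNat ≤ cs.idxOf v := by
        by_contra h
        push Not at h
        have hlt : cs.idxOf v < cs.length := List.idxOf_lt_length_iff.mpr hv
        have hg : cs[cs.idxOf v]? = some v := by
          simp [List.getElem?_eq_getElem hlt, List.getElem_idxOf]
        exact hmin _ h ((singleton_prefix_iff v _).mpr (by rwa [List.head?_drop]))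
      omega
    simp [hv]; omega
  · have : PySem.Chars.find cs [v] = -1 :=
      (PySem.Chars.find_eq_neg_one_iff cs [v]).mpr (by rw [singleton_infix_iff]; exact hv)
    simp [hv, this]

theorem foldl_min_shift (xs : List Int) (a : Int) :
    (xs.map (· + 1)).foldl min (a + 1) = xs.foldl min a + 1 := by
  induction xs generalizing a with
  | nil => simp
  | cons x t ih => simp [List.foldl_cons, ← ih, min_add_add_right]

theorem foldl_min_eq_zero (xs : List Int) (a : Int) (h0 : a = 0 ∨ 0 ∈ xs)
    (hnn : 0 ≤ a ∧ ∀ y ∈ xs, 0 ≤ y) : xs.foldl min a = 0 := by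
  obtain ⟨hle, hmem⟩ := PySem.List.foldl_min_le xs a
  have hub : xs.foldl min a ≤ 0 := by
    rcases h0 with h | h
    · omega
    · exact hmem 0 h
  rcases PySem.List.foldl_min_mem xs a with h | h
  · have := hnn.1; omega
  · have := hnn.2 _ h; omega

-- the per-vowel candidate list for B, over a char list
def pvCands (cs : List Char) : List Int :=
  ("aeiouAEIOU".toList.map (fun v => PySem.Chars.find cs [v])).filter (fun i => decide (0 ≤ i))

theorem filter_map_shift (vs : List Char) (f g : Char → Int)
    (h : ∀ v ∈ vs, (g v = -1 ∧ f v = -1) ∨ (0 ≤ g v ∧ f v = g v + 1)) :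
    (vs.map f).filter (fun i => decide (0 ≤ i)) =
      ((vs.map g).filter (fun i => decide (0 ≤ i))).map (· + 1) := by
  induction vs with
  | nil => simp
  | cons v t ih =>
    have hv := h v (by simp)
    have ht := ih (fun w hw => h w (by simp [hw]))
    rcases hv with ⟨h1, h2⟩ | ⟨h1, h2⟩
    · simp only [List.map_cons, List.filter_cons, h1, h2]
      norm_num [ht]
    · simp only [List.map_cons, List.filter_cons, h2]
      rw [if_pos (by simp; omega), if_pos (by simpa using h1)]
      simp [ht]

theorem pvCands_cons_not_vowel (c : Char) (cs : List Char)
    (hc : c ∉ "aeiouAEIOU".toList) :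
    pvCands (c :: cs) = (pvCands cs).map (· + 1) := by
  unfold pvCands
  apply filter_map_shift
  intro v hv
  have hvc : v ≠ c := fun h => hc (h ▸ hv)
  by_cases hm : v ∈ cs
  · right
    constructor
    · rw [find_single, if_pos hm]; positivity
    · rw [find_single, find_single, if_pos hm,
        if_pos (List.mem_cons.mpr (Or.inr hm)),
        List.idxOf_cons_ne _ (Ne.symm hvc)]
      push_cast; ring
  · left
    have : v ∉ c :: cs := by simp [hvc, hm]
    rw [find_single, find_single, if_neg hm, if_neg this]
    simp

theorem pvCands_nonneg (cs : List Char) : ∀ y ∈ pvCands cs, 0 ≤ y := by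
  intro y hy
  unfold pvCands at hy
  simp [List.mem_filter] at hy
  exact hy.2

theorem pvCands_cons_vowel (c : Char) (cs : List Char)
    (hc : c ∈ "aeiouAEIOU".toList) : 0 ∈ pvCands (c :: cs) := by
  unfold pvCands
  rw [List.mem_filter]
  constructor
  · simp only [List.mem_map]
    exact ⟨c, hc, by simp [find_single]⟩
  · simp

-- B over a char list
def pvB (cs : List Char) : Int :=
  match pvCands cs with
  | [] => -1
  | x :: xs => xs.foldl min x

theorem pvB_eq_pvF (cs : List Char) : pvB cs = pvF cs := by
  induction cs with
  | nil => simp [pvB, pvCands, pvF, PySem.Chars.find]; decide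
  | cons c cs ih =>
    by_cases hc : c ∈ "aeiouAEIOU".toList
    · have h0 := pvCands_cons_vowel c cs hc
      have hnn := pvCands_nonneg (c :: cs)
      unfold pvB
      rcases hcd : pvCands (c :: cs) with _ | ⟨x, xs⟩
      · rw [hcd] at h0; simp at h0
      · rw [hcd] at h0 hnn
        simp only [pvF, hc, if_pos]
        rcases List.mem_cons.mp h0 with h | h
        · exact foldl_min_eq_zero xs x (Or.inl h.symm)
            ⟨hnn x (by simp), fun y hy => hnn y (by simp [hy])⟩
        · exact foldl_min_eq_zero xs x (Or.inr h)
            ⟨hnn x (by simp), fun y hy => hnn y (by simp [hy])⟩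
    · have hshift := pvCands_cons_not_vowel c cs hc
      unfold pvB
      rw [hshift]
      rcases hcd : pvCands cs with _ | ⟨x, xs⟩
      · simp only [List.map_nil, pvF, hc]
        have : pvB cs = -1 := by simp [pvB, hcd]
        rw [ih] at this
        simp [this]
      · have hB : pvB cs = xs.foldl min x := by simp [pvB, hcd]
        have hF : pvF cs = xs.foldl min x := by rw [← ih, hB]
        have hBnn : 0 ≤ xs.foldl min x := by
          rcases PySem.List.foldl_min_mem xs x with h | h
          · rw [h]; exact pvCands_nonneg cs x (by simp [hcd])
          · exact pvCands_nonneg cs _ (by simp [hcd, h])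
        simp only [List.map_cons]
        rw [foldl_min_shift, ← hF]
        simp only [pvF, hc, if_false]
        split_ifs with h <;> omega

theorem pvLoopA_eq (cs : List Char) (k : Int) :
    pvLoopA cs k = if pvF cs = -1 then -1 else k + pvF cs := by
  induction cs generalizing k with
  | nil => simp [pvLoopA, pvF]
  | cons c cs ih =>
    simp only [pvLoopA, pvF]
    by_cases hc : c ∈ "aeiouAEIOU".toList
    · rw [if_pos (by rwa [PySem.Chars.isIn_iff_infix, singleton_infix_iff]),
        if_pos hc]
      simp
    · rw [if_neg (by rw [PySem.Chars.isIn_iff_infix, singleton_infix_iff]; exact hc),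
        if_neg hc, ih]
      have := pvF_ge cs
      split_ifs with h1 h2 <;> first | rfl | omega

-- ===== VERDICT (by name: the statement is the Claim_ definition above) =====
theorem prvi_samoglasnik_spec : Claim_equal_prvi_samoglasnik := by
  intro niz _
  unfold Spec_prvi_samoglasnik prvi_samoglasnik prvi_samoglasnik_alt
  have hcands : ("aeiouAEIOU".toList.map (fun v => PySem.Str.find niz (String.mk [v]))).filter
      (fun i => decide (0 ≤ i)) = pvCands niz.toList := by
    unfold pvCands
    congr 1
  rw [pvLoopA_eq]
  simp only [hcands]
  rw [show (match pvCands niz.toList with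
    | [] => (-1 : Int)
    | x :: xs => xs.foldl min x) = pvB niz.toList from rfl]
  rw [pvB_eq_pvF]
  have := pvF_ge niz.toList
  split_ifs with h <;> omega
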